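-- pv_equiv track=rewrite | github.com/MahatKC/Daniao | Substitution Cyphers/playfair.py | check_uppercase_letters
-- ===== SOURCE A (Python) =====
-- def check_uppercase_letters(plaintext, cyphertext):
--     final_cyphertext = ""
--     i = 0
--     for character in plaintext:
--         if character.isupper():
--             final_cyphertext += cyphertext[i].upper()
--             i += 1
--         elif character.islower():
--             final_cyphertext += cyphertext[i]
--             i += 1
--     final_cyphertext += cyphertext[i:]
--
--     return final_cyphertext
-- ===== SOURCE B (Python) =====
-- def check_uppercase_letters(plaintext, cyphertext):
--     mask = [c.isupper() for c in plaintext if c.isupper() or c.islower()]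
--     mask += [False] * (len(cyphertext) - len(mask))
--     return ''.join(ch.upper() if up else ch for up, ch in zip(mask, cyphertext))
-- ===== Notes on version B (the rewrite author's own statement) =====
-- stated objective: alternative
-- what changed: Replaces A's interleaved walk with a mutable cyphertext index and string concatenation by building a boolean uppercase mask from the plaintext's cased characters, padding it with False to the cyphertext length, and producing the output as one zip over the cyphertext with no index variable and no tail slice.
import Mathlib
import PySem

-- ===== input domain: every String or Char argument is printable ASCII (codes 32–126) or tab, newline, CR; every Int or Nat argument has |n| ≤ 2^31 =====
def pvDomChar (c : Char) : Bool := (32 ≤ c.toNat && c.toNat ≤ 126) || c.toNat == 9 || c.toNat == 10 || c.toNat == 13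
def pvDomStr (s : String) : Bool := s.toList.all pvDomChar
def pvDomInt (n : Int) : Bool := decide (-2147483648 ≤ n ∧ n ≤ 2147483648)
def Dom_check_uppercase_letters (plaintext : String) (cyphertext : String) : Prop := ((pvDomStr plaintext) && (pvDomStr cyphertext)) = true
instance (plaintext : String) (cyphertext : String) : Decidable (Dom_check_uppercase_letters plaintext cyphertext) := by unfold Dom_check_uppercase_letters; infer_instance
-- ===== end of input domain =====

-- B replaces A's indexed interleaved walk by a case-mask padded with False and a single
-- zip over the cyphertext — no index variable and no tail slice (objective: alternative).

-- ===== PORT A =====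
-- A's for-loop over plaintext with state (acc, i); cyphertext[i] is pyGet? (Pre_ keeps it in range).
def pvAgo (cy : List Char) : List Char → Int → List Char → List Char
  | [], i, acc => acc ++ PySem.List.slice cy (some i) none
  | c :: rest, i, acc =>
      if c.isUpper then
        pvAgo cy rest (i + 1) (acc ++ [((PySem.List.pyGet? cy i).getD ' ').toUpper])
      else if c.isLower then
        pvAgo cy rest (i + 1) (acc ++ [(PySem.List.pyGet? cy i).getD ' '])
      else
        pvAgo cy rest i acc

def check_uppercase_letters (plaintext : String) (cyphertext : String) : String :=
  String.ofList (pvAgo cyphertext.toList plaintext.toList 0 [])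

-- ===== PORT B =====
-- Source B's per-position action under the zip.
def pvStep (up : Bool) (ch : Char) : Char := if up then ch.toUpper else ch

def check_uppercase_letters_alt (plaintext : String) (cyphertext : String) : String :=
  let cy := cyphertext.toList
  let mask := (plaintext.toList.filter (fun c => c.isUpper || c.isLower)).map Char.isUpper
  let padded := mask ++ List.replicate (cy.length - mask.length) false
  String.ofList (List.zipWith pvStep padded cy)

-- ===== PRECONDITION & SPEC =====
-- Pre_ excludes exactly the inputs where Python A raises IndexError: more cased characters
-- in the plaintext than there are cyphertext characters.
def Pre_check_uppercase_letters (plaintext : String) (cyphertext : String) : Prop :=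
  plaintext.toList.countP (fun c => c.isUpper || c.isLower) ≤ cyphertext.toList.length
instance (plaintext : String) (cyphertext : String) : Decidable (Pre_check_uppercase_letters plaintext cyphertext) := by unfold Pre_check_uppercase_letters; infer_instance

def pvWitness_check_uppercase_letters : String × String := ("Ab c!", "xyz")

def Spec_check_uppercase_letters (plaintext : String) (cyphertext : String) (out : String) : Prop := out = check_uppercase_letters_alt plaintext cyphertext
instance (plaintext : String) (cyphertext : String) (out : String) : Decidable (Spec_check_uppercase_letters plaintext cyphertext out) := by unfold Spec_check_uppercase_letters; infer_instance

-- ===== CLAIM (what is proved, stated in full; the proofs are below) =====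
def Claim_equal_check_uppercase_letters : Prop := ∀ (plaintext : String) (cyphertext : String), Dom_check_uppercase_letters plaintext cyphertext → Pre_check_uppercase_letters plaintext cyphertext → Spec_check_uppercase_letters plaintext cyphertext (check_uppercase_letters plaintext cyphertext)


-- ===== LEMMAS AND PROOFS =====

-- What A's loop contributes for the cased characters starting at index i.
def pvM (cy : List Char) : Int → List Char → List Char
  | _, [] => []
  | i, c :: rest =>
      (if c.isUpper then ((PySem.List.pyGet? cy i).getD ' ').toUpper
       else (PySem.List.pyGet? cy i).getD ' ') :: pvM cy (i + 1) rest

theorem pvAgo_eq (cy : List Char) (pt : List Char) :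
    ∀ (i : Int) (acc : List Char),
      pvAgo cy pt i acc =
        acc ++ pvM cy i (pt.filter (fun c => c.isUpper || c.isLower)) ++
          PySem.List.slice cy (some (i + (pt.countP (fun c => c.isUpper || c.isLower) : Int))) none := by
  induction pt with
  | nil => intro i acc; simp [pvAgo, pvM]
  | cons c rest ih =>
    intro i acc
    by_cases hu : c.isUpper
    · simp [pvAgo, hu, ih, pvM, List.append_assoc]
      ring_nf
    · by_cases hl : c.isLower
      · simp [pvAgo, hu, hl, ih, pvM, List.append_assoc]
        ring_nf
      · simp [pvAgo, hu, hl, ih]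

-- zipping a run of False against a list returns the list's prefix unchanged.
theorem zip_false (l : List Char) (n : Nat) (h : l.length ≤ n) :
    List.zipWith pvStep (List.replicate n false) l = l := by
  induction l generalizing n with
  | nil => simp
  | cons x xs ih =>
    cases n with
    | zero => simp at h
    | succ m =>
      simp only [List.replicate_succ, List.zipWith_cons_cons, pvStep, if_neg Bool.false_ne_true]
      simp at h
      rw [ih m h]

-- The core: A's cased-map plus tail slice equals B's padded zip, at any start index.
theorem main (cy : List Char) (cs : List Char) :
    ∀ (j : Nat), j + cs.length ≤ cy.length →
      pvM cy (j : Int) cs ++ PySem.List.slice cy (some ((j : Int) + (cs.length : Int))) none =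
        List.zipWith pvStep (cs.map Char.isUpper ++ List.replicate (cy.length - (j + cs.length)) false) (List.drop j cy) := by
  induction cs with
  | nil =>
    intro j hj
    simp only [pvM, List.map_nil, List.nil_append, List.length_nil, Nat.cast_zero, add_zero] at hj ⊢
    rw [PySem.List.slice_from_natCast, zip_false _ _ (by simp)]
  | cons c rest ih =>
    intro j hj
    have hjlt : j < cy.length := by simp at hj; omega
    have hget : PySem.List.pyGet? cy (j : Int) = some cy[j] :=
      PySem.List.pyGet?_ofNat (h := hjlt)
    have hdrop : List.drop j cy = cy[j] :: List.drop (j + 1) cy :=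
      List.drop_eq_getElem_cons hjlt
    have ihr := ih (j + 1) (by simp at hj ⊢; omega)
    have hjc : ((j : Int) + 1) = ((j + 1 : Nat) : Int) := by omega
    simp only [pvM, hget, Option.getD_some, List.map_cons, List.cons_append, hdrop,
      List.length_cons, List.zipWith_cons_cons]
    have e : ((j : Int) + ((rest.length + 1 : Nat) : Int)) = ((j + 1 : Nat) : Int) + (rest.length : Int) := by
      push_cast; ring
    rw [hjc, e, ihr]
    have hn : j + 1 + rest.length = j + (rest.length + 1) := by omega
    rw [hn]
    by_cases hu : c.isUpper <;> simp [pvStep, hu]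

-- ===== VERDICT (by name: the statement is the Claim_ definition above) =====
theorem check_uppercase_letters_spec : Claim_equal_check_uppercase_letters := by
  intro plaintext cyphertext _ hpre
  show _ = _
  unfold check_uppercase_letters check_uppercase_letters_alt
  rw [pvAgo_eq]
  have hc : plaintext.toList.countP (fun c => c.isUpper || c.isLower) =
      (plaintext.toList.filter (fun c => c.isUpper || c.isLower)).length := by
    rw [List.countP_eq_length_filter]
  have h0 := main cyphertext.toList (plaintext.toList.filter (fun c => c.isUpper || c.isLower)) 0
    (by unfold Pre_check_uppercase_letters at hpre; omega)
  simp only [Nat.cast_zero, zero_add, List.drop_zero] at h0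
  simp only [List.nil_append, hc, zero_add, List.length_map, h0]
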